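-- pv_equiv track=rewrite | github.com/nicolaspoulain/gbb | code-cle/classCle.py | somme_tri
-- ===== SOURCE A (Python) =====
-- def somme_tri(c,d):
--   """Fonction de calcul de la liste des nombres apparaissant
--   dans le code cle de la somme de deux nombres en
--   code CLE (deux listes non vides)
--   - Algorithme : Tri prealable d'une liste formee des
--   deux listes fusionnees puis sommation des jumeaux
--   """
--   s = c+d
--   s.sort(reverse=True)
--   for i in range(len(s)-1,0,-1):
--     if s[i-1]==s[i]:   # addition
--       s[i-1] = s[i]+1
--       s.pop(i)
--   return s
-- ===== SOURCE B (Python) =====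
-- def somme_tri(c, d):
--     s = sorted(c + d)
--     if not s:
--         return []
--     out = []
--     cur = s[0]
--     for x in s[1:]:
--         if x == cur:
--             cur += 1
--         else:
--             out.append(cur)
--             cur = x
--     out.append(cur)
--     out.reverse()
--     return out
-- ===== Notes on version B (the rewrite author's own statement) =====
-- stated objective: faster
-- what changed: A sorts descending then repeatedly pops duplicates out of the middle of the list in place; B sorts ascending once and does a single left-to-right carry pass with an accumulator, building the result without any mid-list mutation.
import Mathlib
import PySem

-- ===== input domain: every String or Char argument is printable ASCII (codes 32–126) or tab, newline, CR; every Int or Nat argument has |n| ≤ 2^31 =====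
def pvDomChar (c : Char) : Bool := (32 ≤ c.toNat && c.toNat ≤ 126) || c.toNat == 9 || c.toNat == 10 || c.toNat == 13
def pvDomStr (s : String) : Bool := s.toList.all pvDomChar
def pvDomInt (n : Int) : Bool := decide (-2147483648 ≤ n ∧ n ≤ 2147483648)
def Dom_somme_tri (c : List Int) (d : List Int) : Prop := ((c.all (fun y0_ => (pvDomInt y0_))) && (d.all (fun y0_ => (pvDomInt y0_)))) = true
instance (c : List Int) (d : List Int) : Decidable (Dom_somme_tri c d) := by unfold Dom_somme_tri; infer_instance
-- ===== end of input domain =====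

-- B replaces A's quadratic sort-then-pop-in-place merge by a single linear carry pass
-- over the ascending sort (same return value; no argument is mutated by either).

-- ===== PORT A =====
-- A's loop body: indexing/assignment/pop are total here (the loop never leaves range,
-- proved in the lemmas below), so pyGetD/pySetD/pop?-getD are exact.
def pvStepA (s : List Int) (i : Int) : List Int :=
  if PySem.List.pyGetD s (i - 1) 0 = PySem.List.pyGetD s i 0 then
    ((PySem.List.pop? (PySem.List.pySetD s (i - 1) (PySem.List.pyGetD s i 0 + 1)) i).map Prod.snd).getD s
  else s

def somme_tri (c : List Int) (d : List Int) : List Int :=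
  let s := PySem.List.sorted (c ++ d) (fun x => x) true
  (PySem.List.pyRange ((s.length : Int) - 1) 0 (-1)).foldl pvStepA s

-- ===== PORT B =====
-- B's loop body over (cur, out)
def pvStepB (st : Int × List Int) (x : Int) : Int × List Int :=
  if x = st.1 then (st.1 + 1, st.2) else (x, st.2 ++ [st.1])

def somme_tri_alt (c : List Int) (d : List Int) : List Int :=
  let s := PySem.List.sorted (c ++ d) (fun x => x) false
  match s with
  | [] => []
  | h :: t =>
    let r := t.foldl pvStepB (h, [])
    (r.2 ++ [r.1]).reverse

-- ===== PRECONDITION & SPEC =====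
def Spec_somme_tri (c : List Int) (d : List Int) (out : List Int) : Prop := out = somme_tri_alt c d
instance (c : List Int) (d : List Int) (out : List Int) : Decidable (Spec_somme_tri c d out) := by unfold Spec_somme_tri; infer_instance

-- ===== CLAIM (what is proved, stated in full; the proofs are below) =====
def Claim_equal_somme_tri : Prop := ∀ (c : List Int) (d : List Int), Dom_somme_tri c d → Spec_somme_tri c d (somme_tri c d)

-- ===== LEMMAS AND PROOFS =====

-- common core: r is the (reversed) unprocessed prefix, h the current head value,
-- f the finalized tail
def pvMerge : List Int → Int → List Int → List Int
  | [], h, f => h :: f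
  | a :: u, h, f => if a = h then pvMerge u (h + 1) f else pvMerge u a (h :: f)

theorem pv_sorted_desc_rev (xs : List Int) :
    PySem.List.sorted xs (fun x => x) true = (PySem.List.sorted xs (fun x => x) false).reverse := by
  rw [← List.reverse_reverse (PySem.List.sorted xs (fun x => x) true)]
  congr 1
  apply PySem.List.eq_of_perm_of_pairwise_le_of_injective (fun x : Int => x) (fun a b h => h)
  · exact ((PySem.List.sorted xs (fun x => x) true).reverse_perm).trans
      ((PySem.List.sorted_perm xs (fun x => x) true).trans
        (PySem.List.sorted_perm xs (fun x => x) false).symm)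
  · exact (List.pairwise_reverse).mpr (PySem.List.sorted_pairwise_rev xs (fun x => x))
  · exact PySem.List.sorted_pairwise xs (fun x => x)

theorem pv_getD_mid (pre : List Int) (x : Int) (rest : List Int) (d : Int) :
    PySem.List.pyGetD (pre ++ x :: rest) (pre.length : Int) d = x := by
  rw [PySem.List.pyGetD_natCast]
  simp [List.getD]

theorem pv_set_mid (pre : List Int) (x : Int) (rest : List Int) (v : Int) :
    (pre ++ x :: rest).set pre.length v = pre ++ v :: rest := by
  induction pre with
  | nil => simp
  | cons p pre ih => simp [ih]

theorem pv_erase_mid (pre : List Int) (v h : Int) (rest : List Int) :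
    (pre ++ v :: h :: rest).eraseIdx (pre.length + 1) = pre ++ v :: rest := by
  induction pre with
  | nil => simp
  | cons p pre ih => simp [ih]

theorem pv_lemA (r : List Int) (h : Int) (f : List Int) :
    (PySem.List.pyRange (r.length : Int) 0 (-1)).foldl pvStepA (r.reverse ++ h :: f)
      = pvMerge r h f := by
  induction r generalizing h f with
  | nil => simp [PySem.List.pyRange_neg_one_eq_nil, pvMerge]
  | cons a r ih =>
    rw [PySem.List.pyRange_neg_one_cons (by simp)]
    rw [List.foldl_cons]
    have hs : (a :: r).reverse ++ h :: f = r.reverse ++ a :: (h :: f) := by simp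
    have hlen : ((a :: r).length : Int) - 1 = (r.reverse.length : Int) := by simp
    have hlen2 : ((a :: r).length : Int) = ((r.reverse ++ [a]).length : Int) := by simp
    have hga : PySem.List.pyGetD ((a :: r).reverse ++ h :: f) (((a :: r).length : Int) - 1) 0 = a := by
      rw [hs, hlen, pv_getD_mid]
    have hgh : PySem.List.pyGetD ((a :: r).reverse ++ h :: f) ((a :: r).length : Int) 0 = h := by
      rw [hs, show r.reverse ++ a :: (h :: f) = (r.reverse ++ [a]) ++ h :: f by simp,
        hlen2, pv_getD_mid]
    unfold pvStepA
    rw [hga, hgh]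
    by_cases hah : a = h
    · rw [if_pos hah]
      have hset : PySem.List.pySetD ((a :: r).reverse ++ h :: f) (((a :: r).length : Int) - 1) (h + 1)
          = r.reverse ++ (h + 1) :: h :: f := by
        rw [hs, hlen, PySem.List.pySetD_natCast, pv_set_mid]
      rw [hset]
      have hpop : PySem.List.pop? (r.reverse ++ (h + 1) :: h :: f) ((a :: r).length : Int)
          = some (h, r.reverse ++ (h + 1) :: f) := by
        have hc : ((a :: r).length : Int) = ((r.reverse.length + 1 : Nat) : Int) := by simp
        rw [hc, PySem.List.pop?_natCast _ _ (by simp)]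
        congr 1
        refine Prod.ext ?_ ?_
        · show (r.reverse ++ (h+1) :: h :: f)[r.reverse.length + 1] = h
          simp [List.getElem_append_right]
        · exact pv_erase_mid _ _ _ _
      rw [hpop]
      simpa [pvMerge, hah] using ih (h + 1) f
    · rw [if_neg hah]
      rw [hs]
      simpa [pvMerge, hah] using ih a (h :: f)

theorem pv_lemB (r : List Int) (cur : Int) (out : List Int) :
    (((r.foldl pvStepB (cur, out)).2 ++ [(r.foldl pvStepB (cur, out)).1]).reverse)
      = pvMerge r cur out.reverse := by
  induction r generalizing cur out with
  | nil => simp [pvMerge]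
  | cons x r ih =>
    simp only [List.foldl_cons, pvStepB, pvMerge]
    by_cases hx : x = cur
    · simp [hx, ih]
    · simp [hx, ih]

-- ===== VERDICT (by name: the statement is the Claim_ definition above) =====
theorem somme_tri_spec : Claim_equal_somme_tri := by
  intro c d _
  simp only [Spec_somme_tri, somme_tri, somme_tri_alt]
  rw [pv_sorted_desc_rev]
  cases ht : PySem.List.sorted (c ++ d) (fun x => x) false with
  | nil => simp [PySem.List.pyRange_neg_one_eq_nil]
  | cons h r =>
    have h1 : (((h :: r).reverse).length : Int) - 1 = (r.length : Int) := by simp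
    have h2 : (h :: r).reverse = r.reverse ++ h :: ([] : List Int) := by simp
    rw [h1, h2, pv_lemA r h []]
    exact (by simpa using (pv_lemB r h []).symm)
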